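-- pv_equiv track=rewrite | github.com/hotaru-ishibashi/python-library-atcoder | lowlink.py | lowlink
-- ===== SOURCE A (Python) =====
-- def lowlink(N, G):
--     ords = [-1] * N
--     lows = [N+1] * N
--
--     def dfs(v, order):
--         ords[v] = order
--         low = order
--
--         inc = 1
--         for nv in G[v]:
--             if ords[nv] == -1:
--                 dfs(nv, order+inc)
--                 inc += 1
--             nlow = lows[nv]
--             if nlow > order:
--                 lows[nv] = order
--             low = min(low, nlow)
--
--         lows[v] = low
--         return low
--
--     dfs(0, 0)
--
--     return ords, lows
--
-- N = 3
--
-- G = [[1, 2], [0], []]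
-- ===== SOURCE B (Python) =====
-- def lowlink(N, G):
--     # Iterative explicit-stack DFS instead of recursion; RETURN value equivalence only.
--     ords = [-1] * N
--     lows = [N + 1] * N
--     ords[0] = 0
--     # frame: [v, order, inc, low, i]  (i = index of next neighbour to examine)
--     stack = [[0, 0, 1, 0, 0]]
--     while stack:
--         frame = stack[-1]
--         v, order, inc, low, i = frame
--         nbrs = G[v]
--         if i < len(nbrs):
--             nv = nbrs[i]
--             if ords[nv] == -1:
--                 ords[nv] = order + inc
--                 frame[2] = inc + 1
--                 stack.append([nv, order + inc, 1, order + inc, 0])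
--             else:
--                 nlow = lows[nv]
--                 if nlow > order:
--                     lows[nv] = order
--                 frame[3] = min(low, nlow)
--                 frame[4] = i + 1
--         else:
--             lows[v] = low
--             stack.pop()
--     return ords, lows
-- ===== Notes on version B (the rewrite author's own statement) =====
-- stated objective: alternative
-- what changed: The recursive nested dfs is replaced by an iterative explicit-stack DFS whose frames (v, order, inc, low, neighbour-index) carry the loop state, re-examining a neighbour after its child frame is popped to perform the post-recursion lowlink update.
-- outside the precondition, e.g. on lowlink(1, [[-1], [9]]): A returns ([0], [0]), B returns ([0], [0])
import Mathlib
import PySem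

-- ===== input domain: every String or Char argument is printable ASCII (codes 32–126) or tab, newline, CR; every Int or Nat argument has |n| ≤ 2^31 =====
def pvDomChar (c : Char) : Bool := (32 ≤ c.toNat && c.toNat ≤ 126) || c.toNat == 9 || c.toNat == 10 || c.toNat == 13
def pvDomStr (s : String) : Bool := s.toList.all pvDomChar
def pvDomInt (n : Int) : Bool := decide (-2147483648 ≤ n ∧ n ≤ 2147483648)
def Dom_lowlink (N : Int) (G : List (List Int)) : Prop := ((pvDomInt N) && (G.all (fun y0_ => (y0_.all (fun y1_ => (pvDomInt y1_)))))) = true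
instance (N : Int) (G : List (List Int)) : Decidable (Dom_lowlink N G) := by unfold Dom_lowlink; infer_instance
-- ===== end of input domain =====

-- B replaces A's recursive DFS by an explicit-stack iterative DFS (same numbering and
-- lowlink bookkeeping); RETURN-value equivalence (A mutates only its own local lists).

-- ===== PORT A =====
-- recursive dfs of A; the Nat argument is a fuel guard making the recursion total
-- (under Pre_ it is never exhausted, see lemmas below)
def lowlinkDfs (G : List (List Int)) :
    Nat → Int → Int → List Int × List Int → Option ((List Int × List Int) × Int)
  | 0, _, _, _ => none
  | fuel+1, v, order, s =>
    ((PySem.List.pyGetD G v []).foldl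
      (fun acc nv => acc.bind (fun st =>
        (if PySem.List.pyGetD st.1.1 nv 0 == -1 then
            (lowlinkDfs G fuel nv (order + st.2.2) st.1).map (fun r => (r.1, st.2.2 + 1))
          else some (st.1, st.2.2)).map (fun p =>
          let nlow := PySem.List.pyGetD p.1.2 nv 0
          ((if order < nlow then (p.1.1, PySem.List.pySetD p.1.2 nv order) else p.1),
            min st.2.1 nlow, p.2))))
      (some ((PySem.List.pySetD s.1 v order, s.2), order, 1))).map
      (fun st => ((st.1.1, PySem.List.pySetD st.1.2 v st.2.1), st.2.1))

def lowlink (N : Int) (G : List (List Int)) : List Int × List Int :=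
  let ords : List Int := List.replicate N.toNat (-1)
  let lows : List Int := List.replicate N.toNat (N+1)
  match lowlinkDfs G (N.toNat + 1) 0 0 (ords, lows) with
  | some r => r.1
  | none => (ords, lows)   -- fuel exhausted: unreachable under Pre_

-- ===== PORT B =====
-- one step per iteration of Source B's while loop; frame = (v, order, inc, low, i);
-- the Nat argument is a fuel guard making the while loop total (never exhausted under Pre_)
def lowlinkRun (G : List (List Int)) :
    Nat → List (Int × Int × Int × Int × Int) → List Int × List Int → Option (List Int × List Int)
  | 0, _, _ => none
  | _+1, [], s => some s
  | fuel+1, (v, order, inc, low, i) :: rest, s =>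
    let nbrs := PySem.List.pyGetD G v []
    if i < (nbrs.length : Int) then
      let nv := PySem.List.pyGetD nbrs i 0
      if PySem.List.pyGetD s.1 nv 0 == -1 then
        lowlinkRun G fuel ((nv, order+inc, 1, order+inc, 0) :: (v, order, inc+1, low, i) :: rest)
          (PySem.List.pySetD s.1 nv (order+inc), s.2)
      else
        let nlow := PySem.List.pyGetD s.2 nv 0
        lowlinkRun G fuel ((v, order, inc, min low nlow, i+1) :: rest)
          (if order < nlow then (s.1, PySem.List.pySetD s.2 nv order) else s)
    else
      lowlinkRun G fuel rest (s.1, PySem.List.pySetD s.2 v low)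

def lowlink_alt (N : Int) (G : List (List Int)) : List Int × List Int :=
  let n := N.toNat
  let ords : List Int := PySem.List.pySetD (List.replicate n (-1)) 0 0
  let lows : List Int := List.replicate n (N+1)
  let fuel := n * ((G.foldl (fun a r => a + r.length) 0) + 3) + 1
  match lowlinkRun G fuel [(0, 0, 1, 0, 0)] (ords, lows) with
  | some s => s
  | none => (ords, lows)   -- fuel exhausted: unreachable under Pre_

-- ===== PRECONDITION & SPEC =====
-- raw neighbour values of G that the closure from vertex 0 can reach (a property of the
-- input graph used only by Pre_; a saturating set closure, not the DFS of either program)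
def pvAdd (acc l : List Int) : List Int :=
  l.foldl (fun acc nv => if nv ∈ acc then acc else acc ++ [nv]) acc
def pvGrow (G : List (List Int)) (S : List Int) : List Int :=
  S.foldl (fun acc v => pvAdd acc (PySem.List.pyGetD G v [])) S
def pvReach (G : List (List Int)) : Nat → List Int → List Int
  | 0, S => S
  | fuel+1, S => pvReach G fuel (pvGrow G S)

-- Pre_: every vertex value reachable from 0 is a valid index of both lists, i.e. exactly
-- the graph shape on which A raises no IndexError; it still excludes a few inputs where
-- A returns (an out-of-range value reachable only through an index-alias row the DFS
-- happens to skip as already visited) — on those A and B agree anyway (see cites).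
def Pre_lowlink (N : Int) (G : List (List Int)) : Prop :=
  1 ≤ N ∧ ∀ v ∈ pvReach G (G.foldl (fun a r => a + r.length) 0 + 1) [0],
    -N ≤ v ∧ v < N ∧ -(G.length : Int) ≤ v ∧ v < (G.length : Int)
instance (N : Int) (G : List (List Int)) : Decidable (Pre_lowlink N G) := by
  unfold Pre_lowlink; infer_instance
def pvWitness_lowlink : Int × List (List Int) := (3, [[1, 2], [0], []])

def Spec_lowlink (N : Int) (G : List (List Int)) (out : List Int × List Int) : Prop := out = lowlink_alt N G
instance (N : Int) (G : List (List Int)) (out : List Int × List Int) : Decidable (Spec_lowlink N G out) := by unfold Spec_lowlink; infer_instance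

-- ===== CLAIM (what is proved, stated in full; the proofs are below) =====
def Claim_equal_lowlink : Prop := ∀ (N : Int) (G : List (List Int)), Dom_lowlink N G → Pre_lowlink N G → Spec_lowlink N G (lowlink N G)

-- ===== LEMMAS AND PROOFS =====

-- number of unvisited vertices
def pvCnt (l : List Int) : Nat := l.count (-1)

-- total number of neighbour entries
def pvE (G : List (List Int)) : Nat := G.foldl (fun a r => a + r.length) 0

-- A's neighbour loop (exactly the foldl inside lowlinkDfs at fuel+1)
def pvFoldA (G : List (List Int)) (fuel : Nat) (order : Int) (ns : List Int)
    (acc : Option ((List Int × List Int) × Int × Int)) :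
    Option ((List Int × List Int) × Int × Int) :=
  ns.foldl
    (fun acc nv => acc.bind (fun st =>
      (if PySem.List.pyGetD st.1.1 nv 0 == -1 then
          (lowlinkDfs G fuel nv (order + st.2.2) st.1).map (fun r => (r.1, st.2.2 + 1))
        else some (st.1, st.2.2)).map (fun p =>
        let nlow := PySem.List.pyGetD p.1.2 nv 0
        ((if order < nlow then (p.1.1, PySem.List.pySetD p.1.2 nv order) else p.1),
          min st.2.1 nlow, p.2))))
    acc

theorem pvDfs_unfold (G : List (List Int)) (fuel : Nat) (v order : Int) (s : List Int × List Int) :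
    lowlinkDfs G (fuel+1) v order s =
      (pvFoldA G fuel order (PySem.List.pyGetD G v [])
        (some ((PySem.List.pySetD s.1 v order, s.2), order, 1))).map
        (fun st => ((st.1.1, PySem.List.pySetD st.1.2 v st.2.1), st.2.1)) := rfl

theorem pvIdx_norm (n : Nat) (i : Int) (h : PySem.Raise.InRange n i) :
    ∃ j : Nat, j < n ∧ PySem.List.pyIdx? n i = some j := by
  obtain ⟨h1, h2⟩ := h
  unfold PySem.List.pyIdx?
  by_cases h0 : 0 ≤ i
  · rw [if_pos h0, if_pos h2]; exact ⟨i.toNat, by omega, rfl⟩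
  · rw [if_neg h0, if_pos h1]; exact ⟨n - (-i).toNat, by omega, rfl⟩

theorem pvGetD_of_idx {α : Type} (l : List α) (i : Int) (j : Nat) (d : α)
    (h : PySem.List.pyIdx? l.length i = some j) (hj : j < l.length) :
    PySem.List.pyGetD l i d = l.getD j d := by
  simp [PySem.List.pyGetD, PySem.List.pyGet?, h, List.getD, List.getElem?_eq_getElem hj]

theorem pvSetD_of_idx {α : Type} (l : List α) (i : Int) (j : Nat) (v : α)
    (h : PySem.List.pyIdx? l.length i = some j) :
    PySem.List.pySetD l i v = l.set j v := by
  simp [PySem.List.pySetD, PySem.List.pySet?, h]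

theorem pvCnt_set_dec (l : List Int) (j : Nat) (x : Int) (hj : j < l.length)
    (hl : l.getD j 0 = -1) (hx : x ≠ -1) :
    pvCnt (l.set j x) + 1 = pvCnt l := by
  induction l generalizing j with
  | nil => simp at hj
  | cons a l ih =>
    cases j with
    | zero =>
      simp [List.getD] at hl
      simp [pvCnt, hl, hx]
    | succ j =>
      simp at hj
      simp [List.getD] at hl ih ⊢
      have := ih j hj (by simpa [List.getD] using hl)
      simp [pvCnt, List.count_cons] at this ⊢
      omega

theorem pvGetD_set_self (l : List Int) (j : Nat) (x : Int) (hj : j < l.length) :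
    (l.set j x).getD j 0 = x := by
  simp [List.getD, hj]

theorem pvGetD_set_preserve (l : List Int) (j j' : Nat) (x : Int) (hx : x ≠ -1)
    (h : l.getD j' 0 ≠ -1) : (l.set j x).getD j' 0 ≠ -1 := by
  by_cases hjj : j' = j
  · subst hjj
    by_cases hlt : j' < l.length
    · rw [pvGetD_set_self l j' x hlt]; exact hx
    · rw [List.set_eq_of_length_le (by omega)]; exact h
  · rwa [List.getD, List.getElem?_set_ne (by omega), ← List.getD]

theorem pvE_eq (G : List (List Int)) : ∀ a : Nat,
    G.foldl (fun a r => a + r.length) a = a + (G.map List.length).sum := by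
  induction G with
  | nil => simp
  | cons g G ih => intro a; simp [List.foldl, ih]; omega

theorem pvRow_le (G : List (List Int)) (row : List Int) (h : row ∈ G) :
    row.length ≤ pvE G := by
  have : row.length ∈ G.map List.length := List.mem_map_of_mem h
  have h2 := List.single_le_sum (l := G.map List.length) (fun x _ => Nat.zero_le x) _ this
  rw [pvE, pvE_eq]; omega

theorem pvNbrs_le (G : List (List Int)) (v : Int) :
    (PySem.List.pyGetD G v []).length ≤ pvE G := by
  rcases h : PySem.List.pyGet? G v with _ | row
  · simp [PySem.List.pyGetD, h]
  · have := PySem.List.mem_of_pyGet?_eq_some G h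
    simpa [PySem.List.pyGetD, h] using pvRow_le G row this

theorem pvCnt_pos (l : List Int) (j : Nat) (hj : j < l.length) (h : l.getD j 0 = -1) :
    1 ≤ pvCnt l := by
  have hmem : (-1 : Int) ∈ l := by
    rw [List.getD, List.getElem?_eq_getElem hj] at h
    simp only [Option.getD_some] at h
    exact h ▸ List.getElem_mem hj
  simpa [pvCnt] using List.count_pos_iff.mpr hmem

-- one machine step, for each of the three branches
theorem pvStep_done (G : List (List Int)) (v order inc low i : Int)
    (rest : List (Int × Int × Int × Int × Int)) (s : List Int × List Int)
    (hnot : ¬ i < ((PySem.List.pyGetD G v []).length : Int)) (f : Nat) :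
    lowlinkRun G (f+1) ((v, order, inc, low, i) :: rest) s =
      lowlinkRun G f rest (s.1, PySem.List.pySetD s.2 v low) := by
  simp only [lowlinkRun, if_neg hnot]

theorem pvStep_visited (G : List (List Int)) (v order inc low i nv : Int)
    (rest : List (Int × Int × Int × Int × Int)) (s : List Int × List Int)
    (hlt : i < ((PySem.List.pyGetD G v []).length : Int))
    (hnv : PySem.List.pyGetD (PySem.List.pyGetD G v []) i 0 = nv)
    (hbeq : (PySem.List.pyGetD s.1 nv 0 == (-1 : Int)) = false) (f : Nat) :
    lowlinkRun G (f+1) ((v, order, inc, low, i) :: rest) s =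
      lowlinkRun G f
        ((v, order, inc, min low (PySem.List.pyGetD s.2 nv 0), i+1) :: rest)
        (if order < PySem.List.pyGetD s.2 nv 0 then (s.1, PySem.List.pySetD s.2 nv order) else s) := by
  simp only [lowlinkRun, if_pos hlt, hnv, hbeq, Bool.false_eq_true, if_false]

theorem pvStep_push (G : List (List Int)) (v order inc low i nv : Int)
    (rest : List (Int × Int × Int × Int × Int)) (s : List Int × List Int)
    (hlt : i < ((PySem.List.pyGetD G v []).length : Int))
    (hnv : PySem.List.pyGetD (PySem.List.pyGetD G v []) i 0 = nv)
    (hbeq : (PySem.List.pyGetD s.1 nv 0 == (-1 : Int)) = true) (f : Nat) :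
    lowlinkRun G (f+1) ((v, order, inc, low, i) :: rest) s =
      lowlinkRun G f ((nv, order+inc, 1, order+inc, 0) :: (v, order, inc+1, low, i) :: rest)
        (PySem.List.pySetD s.1 nv (order+inc), s.2) := by
  simp only [lowlinkRun, if_pos hlt, hnv, hbeq, if_true]

theorem pvRun_mono (G : List (List Int)) :
    ∀ (f : Nat) (st : List (Int × Int × Int × Int × Int)) (s r : List Int × List Int),
      lowlinkRun G f st s = some r → ∀ f', f ≤ f' → lowlinkRun G f' st s = some r := by
  intro f
  induction f with
  | zero => intro st s r h; simp [lowlinkRun] at h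
  | succ f ih =>
    rintro st s r h f' hf'
    obtain ⟨f'', rfl⟩ : ∃ k, f' = k + 1 := ⟨f' - 1, by omega⟩
    match st with
    | [] => simpa [lowlinkRun] using h
    | (v, order, inc, low, i) :: rest =>
      simp only [lowlinkRun] at h ⊢
      split_ifs at h ⊢ with h1 h2 <;>
        exact ih _ _ _ h _ (by omega)


-- ----- saturation of the reachability closure used by Pre_ -----

theorem pvAdd_append (l : List Int) : ∀ acc : List Int, ∃ t, pvAdd acc l = acc ++ t := by
  induction l with
  | nil => exact fun acc => ⟨[], by simp [pvAdd]⟩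
  | cons x l ih =>
    intro acc
    rw [show pvAdd acc (x :: l) = pvAdd (if x ∈ acc then acc else acc ++ [x]) l from rfl]
    by_cases hx : x ∈ acc
    · rw [if_pos hx]; exact ih acc
    · rw [if_neg hx]
      obtain ⟨t, ht⟩ := ih (acc ++ [x])
      exact ⟨[x] ++ t, by rw [ht, List.append_assoc]⟩

theorem pvAdd_mem (l : List Int) : ∀ (acc : List Int) (x : Int), (x ∈ acc ∨ x ∈ l) →
    x ∈ pvAdd acc l := by
  induction l with
  | nil =>
    intro acc x h
    simpa [pvAdd] using h.resolve_right (by simp)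
  | cons y l ih =>
    intro acc x h
    rw [show pvAdd acc (y :: l) = pvAdd (if y ∈ acc then acc else acc ++ [y]) l from rfl]
    apply ih
    by_cases hy : y ∈ acc
    · rw [if_pos hy]
      rcases h with h | h
      · exact Or.inl h
      · rcases List.mem_cons.mp h with rfl | h
        · exact Or.inl hy
        · exact Or.inr h
    · rw [if_neg hy]
      rcases h with h | h
      · exact Or.inl (List.mem_append_left _ h)
      · rcases List.mem_cons.mp h with rfl | h
        · exact Or.inl (List.mem_append_right _ (by simp))
        · exact Or.inr h

theorem pvAdd_sub (l : List Int) : ∀ (acc : List Int) (x : Int), x ∈ pvAdd acc l →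
    x ∈ acc ∨ x ∈ l := by
  induction l with
  | nil => intro acc x h; left; simpa [pvAdd] using h
  | cons y l ih =>
    intro acc x h
    rw [show pvAdd acc (y :: l) = pvAdd (if y ∈ acc then acc else acc ++ [y]) l from rfl] at h
    rcases ih _ _ h with h' | h'
    · by_cases hy : y ∈ acc
      · rw [if_pos hy] at h'; exact Or.inl h'
      · rw [if_neg hy] at h'
        rcases List.mem_append.mp h' with h'' | h''
        · exact Or.inl h''
        · simp only [List.mem_singleton] at h''
          exact Or.inr (by simp [h''])
    · exact Or.inr (List.mem_cons_of_mem _ h')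

theorem pvAdd_nodup (l : List Int) : ∀ acc : List Int, acc.Nodup → (pvAdd acc l).Nodup := by
  induction l with
  | nil => intro acc h; simpa [pvAdd] using h
  | cons y l ih =>
    intro acc h
    rw [show pvAdd acc (y :: l) = pvAdd (if y ∈ acc then acc else acc ++ [y]) l from rfl]
    apply ih
    by_cases hy : y ∈ acc
    · rw [if_pos hy]; exact h
    · rw [if_neg hy]
      rw [List.nodup_append]
      refine ⟨h, by simp, ?_⟩
      intro a ha b hb
      simp only [List.mem_singleton] at hb
      exact fun hab => hy ((hab.trans hb) ▸ ha)

theorem pvGrowAux_append (G : List (List Int)) (l : List Int) : ∀ acc : List Int,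
    ∃ t, l.foldl (fun acc v => pvAdd acc (PySem.List.pyGetD G v [])) acc = acc ++ t := by
  induction l with
  | nil => exact fun acc => ⟨[], by simp⟩
  | cons v l ih =>
    intro acc
    simp only [List.foldl_cons]
    obtain ⟨t1, h1⟩ := pvAdd_append (PySem.List.pyGetD G v []) acc
    obtain ⟨t2, h2⟩ := ih (pvAdd acc (PySem.List.pyGetD G v []))
    exact ⟨t1 ++ t2, by rw [h2, h1, List.append_assoc]⟩

theorem pvGrowAux_mem (G : List (List Int)) (l : List Int) (acc : List Int) (x : Int)
    (h : x ∈ acc) : x ∈ l.foldl (fun acc v => pvAdd acc (PySem.List.pyGetD G v [])) acc := by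
  obtain ⟨t, ht⟩ := pvGrowAux_append G l acc
  rw [ht]
  exact List.mem_append_left _ h

theorem pvGrow_mem (G : List (List Int)) (S : List Int) (x : Int) (h : x ∈ S) :
    x ∈ pvGrow G S :=
  pvGrowAux_mem G S S x h

theorem pvGrow_row (G : List (List Int)) (l : List Int) : ∀ (acc : List Int) (v : Int),
    v ∈ l → ∀ nv ∈ PySem.List.pyGetD G v [],
      nv ∈ l.foldl (fun acc v => pvAdd acc (PySem.List.pyGetD G v [])) acc := by
  induction l with
  | nil => intro acc v hv; simp at hv
  | cons u l ih =>
    intro acc v hv nv hnv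
    simp only [List.foldl_cons]
    rcases List.mem_cons.mp hv with rfl | hv
    · exact pvGrowAux_mem G l _ nv (pvAdd_mem _ _ nv (Or.inr hnv))
    · exact ih _ v hv nv hnv

theorem pvRow_flatten (G : List (List Int)) (v x : Int) (h : x ∈ PySem.List.pyGetD G v []) :
    x ∈ G.flatten := by
  rcases hg : PySem.List.pyGet? G v with _ | row
  · simp [PySem.List.pyGetD, hg] at h
  · rw [PySem.List.pyGetD, hg] at h
    exact List.mem_flatten.mpr ⟨row, PySem.List.mem_of_pyGet?_eq_some G hg, h⟩

theorem pvGrow_sub (G : List (List Int)) (l : List Int) : ∀ (acc : List Int) (x : Int),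
    x ∈ l.foldl (fun acc v => pvAdd acc (PySem.List.pyGetD G v [])) acc →
      x ∈ acc ∨ x ∈ G.flatten := by
  induction l with
  | nil => intro acc x h; left; exact h
  | cons u l ih =>
    intro acc x h
    simp only [List.foldl_cons] at h
    rcases ih _ _ h with h' | h'
    · rcases pvAdd_sub _ _ _ h' with h'' | h''
      · left; exact h''
      · right; exact pvRow_flatten G u x h''
    · right; exact h'

theorem pvGrow_nodup (G : List (List Int)) (l : List Int) : ∀ acc : List Int, acc.Nodup →
    (l.foldl (fun acc v => pvAdd acc (PySem.List.pyGetD G v [])) acc).Nodup := by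
  induction l with
  | nil => intro acc h; exact h
  | cons u l ih =>
    intro acc h
    simp only [List.foldl_cons]
    exact ih _ (pvAdd_nodup _ _ h)

theorem pvReach_mem (G : List (List Int)) (f : Nat) : ∀ (S : List Int) (x : Int), x ∈ S →
    x ∈ pvReach G f S := by
  induction f with
  | zero => intro S x h; exact h
  | succ f ih => intro S x h; exact ih _ x (pvGrow_mem G S x h)

theorem pvNodup_len (l m : List Int) (hn : l.Nodup) (hs : ∀ x ∈ l, x ∈ m) :
    l.length ≤ m.dedup.length := by
  have h1 := List.toFinset_card_of_nodup hn
  have h2 := List.card_toFinset m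
  have h3 : l.toFinset ⊆ m.toFinset := fun x hx =>
    List.mem_toFinset.mpr (hs x (List.mem_toFinset.mp hx))
  have := Finset.card_le_card h3
  omega

theorem pvReach_fix (G : List (List Int)) : ∀ (f : Nat) (S : List Int),
    pvGrow G S = S → pvReach G f S = S := by
  intro f
  induction f with
  | zero => intro S _; rfl
  | succ f ih =>
    intro S h
    show pvReach G f (pvGrow G S) = S
    rw [h]
    exact ih S h

theorem pvReach_closed (G : List (List Int)) : ∀ (f : Nat) (S : List Int), S.Nodup →
    (∀ x ∈ S, x ∈ (0 : Int) :: G.flatten) →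
    ((0 : Int) :: G.flatten).dedup.length ≤ f + S.length →
    pvGrow G (pvReach G f S) = pvReach G f S := by
  intro f
  induction f with
  | zero =>
    intro S hn hsub hfuel
    show pvGrow G S = S
    obtain ⟨t, ht⟩ := pvGrowAux_append G S S
    match t, ht with
    | [], ht => rw [show pvGrow G S = S ++ [] from ht, List.append_nil]
    | a :: t, ht =>
      exfalso
      have hn' : (pvGrow G S).Nodup := pvGrow_nodup G S S hn
      have hsub' : ∀ x ∈ pvGrow G S, x ∈ (0 : Int) :: G.flatten := fun x hx =>
        (pvGrow_sub G S S x hx).elim (hsub x) (fun h => List.mem_cons_of_mem _ h)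
      have hlen := pvNodup_len _ _ hn' hsub'
      rw [show pvGrow G S = S ++ a :: t from ht] at hlen
      simp [List.length_append] at hlen
      omega
  | succ f ih =>
    intro S hn hsub hfuel
    show pvGrow G (pvReach G f (pvGrow G S)) = pvReach G f (pvGrow G S)
    by_cases hfix : pvGrow G S = S
    · rw [hfix, pvReach_fix G f S hfix]
      exact hfix
    · have hsub' : ∀ x ∈ pvGrow G S, x ∈ (0 : Int) :: G.flatten := fun x hx =>
        (pvGrow_sub G S S x hx).elim (hsub x) (fun h => List.mem_cons_of_mem _ h)
      apply ih (pvGrow G S) (pvGrow_nodup G S S hn) hsub'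
      obtain ⟨t, ht⟩ := pvGrowAux_append G S S
      have ht' : t ≠ [] := by
        intro h
        exact hfix (by rw [show pvGrow G S = S ++ t from ht, h, List.append_nil])
      have : 1 ≤ t.length := List.length_pos_iff.mpr ht'
      rw [show pvGrow G S = S ++ t from ht]
      simp [List.length_append]
      omega

-- the main simulation-and-progress lemma: A's neighbour loop terminates and the
-- stack machine, started on the corresponding frame, reaches the corresponding state
theorem pvMain (G : List (List Int)) (R : List Int) (n0 : Nat)
    (hclosed : ∀ v ∈ R, ∀ nv ∈ PySem.List.pyGetD G v [], nv ∈ R)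
    (hsafe : ∀ v ∈ R, PySem.Raise.InRange n0 v) :
    ∀ (fuel : Nat) (ns : List Int) (iN : Nat) (v order inc low : Int)
      (s : List Int × List Int),
      v ∈ R → s.1.length = n0 → 0 ≤ order → 1 ≤ inc →
      ns = (PySem.List.pyGetD G v []).drop iN →
      pvCnt s.1 ≤ fuel →
      ∃ out, pvFoldA G fuel order ns (some (s, low, inc)) = some out ∧
        out.1.1.length = n0 ∧ pvCnt out.1.1 ≤ pvCnt s.1 ∧
        (∀ j : Nat, s.1.getD j 0 ≠ -1 → out.1.1.getD j 0 ≠ -1) ∧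
        ∃ k, k ≤ ns.length + 1 + (pvCnt s.1 - pvCnt out.1.1) * (pvE G + 3) ∧
          ∀ (f : Nat) (rest : List (Int × Int × Int × Int × Int)),
            lowlinkRun G (f + k) ((v, order, inc, low, (iN : Int)) :: rest) s =
              lowlinkRun G f rest (out.1.1, PySem.List.pySetD out.1.2 v out.2.1) := by
  intro fuel
  induction fuel with
  | zero =>
    intro ns iN v order inc low s hv hlen hord hinc hns hcnt
    revert iN inc low s
    induction ns with
    | nil =>
      intro iN inc low s hlen hinc hns hcnt
      refine ⟨(s, low, inc), rfl, hlen, le_refl _, fun j h => h, 1, by simp, ?_⟩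
      intro f rest
      have hge : (PySem.List.pyGetD G v []).length ≤ iN := by
        have := congrArg List.length hns
        simp [List.length_drop] at this
        omega
      exact pvStep_done G v order inc low _ rest s (by omega) f
    | cons nv ns' ihns =>
      intro iN inc low s hlen hinc hns hcnt
      have hlendrop := congrArg List.length hns
      simp only [List.length_cons, List.length_drop] at hlendrop
      have hiNlen : iN < (PySem.List.pyGetD G v []).length := by omega
      have hget : (PySem.List.pyGetD G v [])[iN]? = some nv := by
        have h0 : ((PySem.List.pyGetD G v []).drop iN)[0]? = some nv := by
          rw [← hns]; rfl
        rwa [List.getElem?_drop, Nat.add_zero] at h0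
      have hnvR : nv ∈ R := hclosed v hv nv (List.mem_of_getElem? hget)
      have hInR : PySem.Raise.InRange n0 nv := hsafe nv hnvR
      obtain ⟨j, hj, hidx⟩ := pvIdx_norm n0 nv hInR
      have hidx_s : PySem.List.pyIdx? s.1.length nv = some j := by rw [hlen]; exact hidx
      by_cases hvis : PySem.List.pyGetD s.1 nv 0 = -1
      · exfalso
        have hgd : s.1.getD j 0 = -1 := by
          rw [← pvGetD_of_idx s.1 nv j 0 hidx_s (by omega)]; exact hvis
        have := pvCnt_pos s.1 j (by omega) hgd
        omega
      · -- visited neighbour: one edge-processing step on both sides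
        have hgetd : PySem.List.pyGetD (PySem.List.pyGetD G v []) (iN : Int) 0 = nv := by
          rw [PySem.List.pyGetD_natCast, List.getD, hget]; rfl
        have hlt : (iN : Int) < ((PySem.List.pyGetD G v []).length : Int) := by
          exact_mod_cast hiNlen
        have hbeq : (PySem.List.pyGetD s.1 nv 0 == (-1 : Int)) = false := by
          simp [hvis]
        have hdrop' : ns' = (PySem.List.pyGetD G v []).drop (iN + 1) := by
          rw [← List.tail_drop, ← hns]; rfl
        have hfoldstep :
            pvFoldA G 0 order (nv :: ns') (some (s, low, inc)) =
              pvFoldA G 0 order ns'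
                (some ((if order < PySem.List.pyGetD s.2 nv 0 then
                    (s.1, PySem.List.pySetD s.2 nv order) else s),
                  min low (PySem.List.pyGetD s.2 nv 0), inc)) := by
          simp only [pvFoldA, List.foldl_cons, Option.bind_some, hbeq, Bool.false_eq_true,
            if_false, Option.map_some]
        have hS2 : (if order < PySem.List.pyGetD s.2 nv 0 then
            (s.1, PySem.List.pySetD s.2 nv order) else s).1 = s.1 := by
          split <;> rfl
        obtain ⟨out, hfold, holen, hocnt, hopres, k', hk', hrun'⟩ :=
          ihns (iN + 1) inc (min low (PySem.List.pyGetD s.2 nv 0))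
            (if order < PySem.List.pyGetD s.2 nv 0 then
              (s.1, PySem.List.pySetD s.2 nv order) else s)
            (by rw [hS2]; exact hlen) hinc hdrop' (by rw [hS2]; exact hcnt)
        refine ⟨out, by rw [hfoldstep]; exact hfold, holen, by rw [hS2] at hocnt; exact hocnt,
          fun j h => by rw [hS2] at hopres; exact hopres j h, k' + 1, ?_, ?_⟩
        · rw [hS2] at hk'
          simp only [List.length_cons]
          omega
        · intro f rest
          rw [show f + (k' + 1) = (f + k') + 1 by omega,
            pvStep_visited G v order inc low (iN : Int) nv rest s hlt hgetd hbeq]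
          have := hrun' f rest
          push_cast at this
          exact this
  | succ fb ihf =>
    intro ns iN v order inc low s hv hlen hord hinc hns hcnt
    revert iN inc low s
    induction ns with
    | nil =>
      intro iN inc low s hlen hinc hns hcnt
      refine ⟨(s, low, inc), rfl, hlen, le_refl _, fun j h => h, 1, by simp, ?_⟩
      intro f rest
      have hge : (PySem.List.pyGetD G v []).length ≤ iN := by
        have := congrArg List.length hns
        simp [List.length_drop] at this
        omega
      exact pvStep_done G v order inc low _ rest s (by omega) f
    | cons nv ns' ihns =>
      intro iN inc low s hlen hinc hns hcnt
      have hlendrop := congrArg List.length hns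
      simp only [List.length_cons, List.length_drop] at hlendrop
      have hiNlen : iN < (PySem.List.pyGetD G v []).length := by omega
      have hget : (PySem.List.pyGetD G v [])[iN]? = some nv := by
        have h0 : ((PySem.List.pyGetD G v []).drop iN)[0]? = some nv := by
          rw [← hns]; rfl
        rwa [List.getElem?_drop, Nat.add_zero] at h0
      have hnvR : nv ∈ R := hclosed v hv nv (List.mem_of_getElem? hget)
      have hInR : PySem.Raise.InRange n0 nv := hsafe nv hnvR
      obtain ⟨j, hj, hidx⟩ := pvIdx_norm n0 nv hInR
      have hidx_s : PySem.List.pyIdx? s.1.length nv = some j := by rw [hlen]; exact hidx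
      have hgetd : PySem.List.pyGetD (PySem.List.pyGetD G v []) (iN : Int) 0 = nv := by
        rw [PySem.List.pyGetD_natCast, List.getD, hget]; rfl
      have hlt : (iN : Int) < ((PySem.List.pyGetD G v []).length : Int) := by
        exact_mod_cast hiNlen
      have hdrop' : ns' = (PySem.List.pyGetD G v []).drop (iN + 1) := by
        rw [← List.tail_drop, ← hns]; rfl
      by_cases hvis : PySem.List.pyGetD s.1 nv 0 = -1
      · -- unvisited neighbour: recurse (A) / push a frame (B)
        have hbeq : (PySem.List.pyGetD s.1 nv 0 == (-1 : Int)) = true := by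
          simp [hvis]
        have hgd : s.1.getD j 0 = -1 := by
          rw [← pvGetD_of_idx s.1 nv j 0 hidx_s (by omega)]; exact hvis
        have hscset : PySem.List.pySetD s.1 nv (order + inc) = s.1.set j (order + inc) :=
          pvSetD_of_idx s.1 nv j _ hidx_s
        have hlen_sc : (PySem.List.pySetD s.1 nv (order + inc)).length = n0 := by
          rw [hscset, List.length_set, hlen]
        have hcnt_sc : pvCnt (PySem.List.pySetD s.1 nv (order + inc)) + 1 = pvCnt s.1 := by
          rw [hscset]
          exact pvCnt_set_dec s.1 j _ (by omega) hgd (by omega)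
        obtain ⟨cst, hcfold, hclen, hccnt, hcpres, kc, hkc, hcrun⟩ :=
          ihf (PySem.List.pyGetD G nv []) 0 nv (order + inc) 1 (order + inc)
            (PySem.List.pySetD s.1 nv (order + inc), s.2) hnvR hlen_sc (by omega) (le_refl 1)
            (by rw [List.drop_zero])
            (by show pvCnt (PySem.List.pySetD s.1 nv (order + inc)) ≤ fb; omega)
        rw [show ((PySem.List.pySetD s.1 nv (order + inc), s.2) : List Int × List Int).1 =
          PySem.List.pySetD s.1 nv (order + inc) from rfl] at hccnt hkc
        have hchild : lowlinkDfs G (fb + 1) nv (order + inc) s =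
            some ((cst.1.1, PySem.List.pySetD cst.1.2 nv cst.2.1), cst.2.1) := by
          rw [pvDfs_unfold, hcfold]; rfl
        have hfoldstep :
            pvFoldA G (fb + 1) order (nv :: ns') (some (s, low, inc)) =
              pvFoldA G (fb + 1) order ns'
                (some ((if order < PySem.List.pyGetD (PySem.List.pySetD cst.1.2 nv cst.2.1) nv 0 then
                    (cst.1.1, PySem.List.pySetD (PySem.List.pySetD cst.1.2 nv cst.2.1) nv order)
                  else (cst.1.1, PySem.List.pySetD cst.1.2 nv cst.2.1)),
                  min low (PySem.List.pyGetD (PySem.List.pySetD cst.1.2 nv cst.2.1) nv 0),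
                  inc + 1)) := by
          simp only [pvFoldA, List.foldl_cons, Option.bind_some, hbeq, if_true, hchild,
            Option.map_some]
        have hS2len : (if order < PySem.List.pyGetD (PySem.List.pySetD cst.1.2 nv cst.2.1) nv 0 then
            (cst.1.1, PySem.List.pySetD (PySem.List.pySetD cst.1.2 nv cst.2.1) nv order)
          else (cst.1.1, PySem.List.pySetD cst.1.2 nv cst.2.1)).1 = cst.1.1 := by
          split <;> rfl
        obtain ⟨out, hfold, holen, hocnt, hopres, k', hk', hrun'⟩ :=
          ihns (iN + 1) (inc + 1)
            (min low (PySem.List.pyGetD (PySem.List.pySetD cst.1.2 nv cst.2.1) nv 0))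
            (if order < PySem.List.pyGetD (PySem.List.pySetD cst.1.2 nv cst.2.1) nv 0 then
              (cst.1.1, PySem.List.pySetD (PySem.List.pySetD cst.1.2 nv cst.2.1) nv order)
            else (cst.1.1, PySem.List.pySetD cst.1.2 nv cst.2.1))
            (by rw [hS2len]; exact hclen) (by omega) hdrop'
            (by rw [hS2len]; omega)
        rw [hS2len] at hocnt hopres hk'
        have hscget : (PySem.List.pySetD s.1 nv (order + inc)).getD j 0 = order + inc := by
          rw [hscset]; exact pvGetD_set_self s.1 j _ (by omega)
        have hcstget : cst.1.1.getD j 0 ≠ -1 :=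
          hcpres j (by rw [hscget]; omega)
        have hbeq2 : (PySem.List.pyGetD cst.1.1 nv 0 == (-1 : Int)) = false := by
          have h1 : PySem.List.pyGetD cst.1.1 nv 0 = cst.1.1.getD j 0 :=
            pvGetD_of_idx cst.1.1 nv j 0 (by rw [hclen]; exact hidx) (by omega)
          rw [h1, beq_eq_false_iff_ne]
          exact hcstget
        refine ⟨out, by rw [hfoldstep]; exact hfold, holen, by omega,
          fun j' h => hopres j' (hcpres j' (by
            rw [hscset]
            exact pvGetD_set_preserve s.1 j j' (order + inc) (by omega) h)),
          k' + kc + 2, ?_, ?_⟩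
        · -- arithmetic for the step bound
          have hnb : (PySem.List.pyGetD G nv []).length ≤ pvE G := pvNbrs_le G nv
          have hsum : (pvCnt cst.1.1 - pvCnt out.1.1) * (pvE G + 3) +
              (pvCnt (PySem.List.pySetD s.1 nv (order + inc)) - pvCnt cst.1.1) * (pvE G + 3) =
              (pvCnt (PySem.List.pySetD s.1 nv (order + inc)) - pvCnt out.1.1) * (pvE G + 3) := by
            rw [← Nat.add_mul]
            congr 1
            omega
          have hstep : (pvCnt s.1 - pvCnt out.1.1) * (pvE G + 3) =
              (pvCnt (PySem.List.pySetD s.1 nv (order + inc)) - pvCnt out.1.1) * (pvE G + 3) +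
                (pvE G + 3) := by
            rw [show pvCnt s.1 - pvCnt out.1.1 =
              (pvCnt (PySem.List.pySetD s.1 nv (order + inc)) - pvCnt out.1.1) + 1 by omega,
              Nat.add_mul, Nat.one_mul]
          simp only [List.length_cons]
          omega
        · intro f rest
          rw [show f + (k' + kc + 2) = (((f + k') + 1) + kc) + 1 by omega,
            pvStep_push G v order inc low (iN : Int) nv rest s hlt hgetd hbeq]
          have hc := hcrun ((f + k') + 1) ((v, order, inc + 1, low, (iN : Int)) :: rest)
          simp only [Nat.cast_zero] at hc
          rw [hc, pvStep_visited G v order (inc + 1) low (iN : Int) nv rest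
            (cst.1.1, PySem.List.pySetD cst.1.2 nv cst.2.1) hlt hgetd hbeq2]
          have := hrun' f rest
          push_cast at this
          exact this
      · -- visited neighbour: one edge-processing step on both sides
        have hbeq : (PySem.List.pyGetD s.1 nv 0 == (-1 : Int)) = false := by
          simp [hvis]
        have hfoldstep :
            pvFoldA G (fb + 1) order (nv :: ns') (some (s, low, inc)) =
              pvFoldA G (fb + 1) order ns'
                (some ((if order < PySem.List.pyGetD s.2 nv 0 then
                    (s.1, PySem.List.pySetD s.2 nv order) else s),
                  min low (PySem.List.pyGetD s.2 nv 0), inc)) := by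
          simp only [pvFoldA, List.foldl_cons, Option.bind_some, hbeq, Bool.false_eq_true,
            if_false, Option.map_some]
        have hS2 : (if order < PySem.List.pyGetD s.2 nv 0 then
            (s.1, PySem.List.pySetD s.2 nv order) else s).1 = s.1 := by
          split <;> rfl
        obtain ⟨out, hfold, holen, hocnt, hopres, k', hk', hrun'⟩ :=
          ihns (iN + 1) inc (min low (PySem.List.pyGetD s.2 nv 0))
            (if order < PySem.List.pyGetD s.2 nv 0 then
              (s.1, PySem.List.pySetD s.2 nv order) else s)
            (by rw [hS2]; exact hlen) hinc hdrop' (by rw [hS2]; exact hcnt)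
        refine ⟨out, by rw [hfoldstep]; exact hfold, holen, by rw [hS2] at hocnt; exact hocnt,
          fun j h => by rw [hS2] at hopres; exact hopres j h, k' + 1, ?_, ?_⟩
        · rw [hS2] at hk'
          simp only [List.length_cons]
          omega
        · intro f rest
          rw [show f + (k' + 1) = (f + k') + 1 by omega,
            pvStep_visited G v order inc low (iN : Int) nv rest s hlt hgetd hbeq]
          have := hrun' f rest
          push_cast at this
          exact this

-- ===== VERDICT (by name: the statement is the Claim_ definition above) =====
theorem pvCnt_replicate (n : Nat) : pvCnt (List.replicate n (-1 : Int)) = n := by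
  simp [pvCnt]

theorem lowlink_spec : Claim_equal_lowlink := by
  intro N G _hdom hpre
  obtain ⟨hN, hsafeP⟩ := hpre
  unfold Spec_lowlink
  have hnN : ((N.toNat : Nat) : Int) = N := by omega
  set n := N.toNat with hn
  have hn1 : 1 ≤ n := by omega
  set R := pvReach G (G.foldl (fun a r => a + r.length) 0 + 1) [0] with hRdef
  have hgrow : pvGrow G R = R := by
    rw [hRdef]
    apply pvReach_closed G _ [0] (by simp) (by simp)
    have h1 : ((0 : Int) :: G.flatten).dedup.length ≤ ((0 : Int) :: G.flatten).length :=
      (List.dedup_sublist _).length_le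
    have h2 : G.flatten.length = G.foldl (fun a r => a + r.length) 0 := by
      rw [List.length_flatten, show G.foldl (fun a r => a + r.length) 0 = pvE G from rfl,
        pvE, pvE_eq]
      omega
    simp only [List.length_cons] at h1 ⊢
    omega
  have hclosed : ∀ v ∈ R, ∀ nv ∈ PySem.List.pyGetD G v [], nv ∈ R := by
    intro v hv nv hnv
    have hmem : nv ∈ pvGrow G R := pvGrow_row G R R v hv nv hnv
    rwa [hgrow] at hmem
  have hsafe : ∀ v ∈ R, PySem.Raise.InRange n v := by
    intro v hv
    have := hsafeP v hv
    show -(n : Int) ≤ v ∧ v < (n : Int)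
    omega
  have h0R : (0 : Int) ∈ R := pvReach_mem G _ [0] 0 (by simp)
  have hidx0 : PySem.List.pyIdx? (List.replicate n (-1 : Int)).length (0 : Int) = some 0 := by
    rw [List.length_replicate]
    unfold PySem.List.pyIdx?
    rw [if_pos le_rfl, if_pos (by exact_mod_cast hn1)]
    rfl
  have hset0 : PySem.List.pySetD (List.replicate n (-1 : Int)) 0 0 =
      (List.replicate n (-1 : Int)).set 0 0 :=
    pvSetD_of_idx _ _ _ _ hidx0
  have hcnt0 : pvCnt (PySem.List.pySetD (List.replicate n (-1 : Int)) 0 0) + 1 = n := by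
    rw [hset0]
    have := pvCnt_set_dec (List.replicate n (-1 : Int)) 0 0
      (by rw [List.length_replicate]; omega)
      (by rw [List.getD, List.getElem?_replicate, if_pos (by omega)]; rfl)
      (by omega)
    rw [this, pvCnt_replicate]
  obtain ⟨out, hfold, holen, hocnt, hopres, k, hk, hrun⟩ :=
    pvMain G R n hclosed hsafe n (PySem.List.pyGetD G (0 : Int) []) 0 0 0 1 0
      (PySem.List.pySetD (List.replicate n (-1 : Int)) 0 0, List.replicate n (N + 1)) h0R
      (by show (PySem.List.pySetD (List.replicate n (-1 : Int)) 0 0).length = n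
          rw [hset0, List.length_set, List.length_replicate])
      (le_refl 0) (le_refl 1) (by rw [List.drop_zero])
      (by show pvCnt (PySem.List.pySetD (List.replicate n (-1 : Int)) 0 0) ≤ n; omega)
  rw [show ((PySem.List.pySetD (List.replicate n (-1 : Int)) 0 0,
    List.replicate n (N + 1)) : List Int × List Int).1 =
      PySem.List.pySetD (List.replicate n (-1 : Int)) 0 0 from rfl] at hocnt hk
  -- A's value
  have hA : lowlink N G = (out.1.1, PySem.List.pySetD out.1.2 0 out.2.1) := by
    show (match lowlinkDfs G (N.toNat + 1) 0 0
        (List.replicate N.toNat (-1), List.replicate N.toNat (N + 1)) with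
      | some r => r.1
      | none => (List.replicate N.toNat (-1), List.replicate N.toNat (N + 1))) = _
    rw [← hn, pvDfs_unfold, hfold]
    rfl
  -- B's run reaches the same final state
  have hrunEq := hrun 1 []
  simp only [Nat.cast_zero] at hrunEq
  have hT : lowlinkRun G (1 + k) [((0 : Int), (0 : Int), (1 : Int), (0 : Int), (0 : Int))]
      (PySem.List.pySetD (List.replicate n (-1 : Int)) 0 0, List.replicate n (N + 1)) =
      some (out.1.1, PySem.List.pySetD out.1.2 0 out.2.1) := by
    rw [hrunEq]
    rfl
  have hF : 1 + k ≤ n * (pvE G + 3) + 1 := by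
    have hnb : (PySem.List.pyGetD G (0 : Int) []).length ≤ pvE G := pvNbrs_le G 0
    have hd : pvCnt (PySem.List.pySetD (List.replicate n (-1 : Int)) 0 0) -
        pvCnt out.1.1 ≤ n - 1 := by omega
    have hmul := Nat.mul_le_mul_right (pvE G + 3) hd
    have hexp : n * (pvE G + 3) = (n - 1) * (pvE G + 3) + 1 * (pvE G + 3) := by
      rw [← Nat.add_mul]
      congr 1
      omega
    omega
  have hB := pvRun_mono G (1 + k) _ _ _ hT (n * (pvE G + 3) + 1) hF
  -- B's value
  show _ = (match lowlinkRun G (N.toNat * ((G.foldl (fun a r => a + r.length) 0) + 3) + 1)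
      [((0 : Int), (0 : Int), (1 : Int), (0 : Int), (0 : Int))]
      (PySem.List.pySetD (List.replicate N.toNat (-1)) 0 0, List.replicate N.toNat (N + 1)) with
    | some s => s
    | none => (PySem.List.pySetD (List.replicate N.toNat (-1)) 0 0, List.replicate N.toNat (N + 1)))
  rw [← hn]
  rw [show (G.foldl (fun a r => a + r.length) 0) = pvE G from rfl, hB, hA]
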